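-- pv_equiv track=rewrite | github.com/garayco/etl_project | utils/emotions_analysis.py | get_primary_emotion
-- ===== SOURCE A (Python) =====
-- def get_primary_emotion(emotion_scores):
--     if not emotion_scores:
--         return "neutral"
--
--     max_value = max(emotion_scores.values())
--     top_emotions = [k for k, v in emotion_scores.items() if v == max_value]
--
--     # Plutchik's Wheel of Emotions priority order
--     priority_order = [
--         "fear",
--         "sadness",
--         "anger",
--         "disgust",
--         "joy",
--         "trust",
--         "anticipation",
--         "surprise",
--     ]
--
--     for emotion in priority_order:
--         if emotion in top_emotions:
--             return emotion
-- ===== SOURCE B (Python) =====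
-- def get_primary_emotion(emotion_scores):
--     # Plutchik's Wheel of Emotions priority order
--     priority_order = [
--         "fear",
--         "sadness",
--         "anger",
--         "disgust",
--         "joy",
--         "trust",
--         "anticipation",
--         "surprise",
--     ]
--     rank = {e: i for i, e in enumerate(priority_order)}
--     n = len(priority_order)
--
--     max_value = None
--     best = n  # n means: no priority-listed emotion seen at the current max
--     for emotion, score in emotion_scores.items():
--         r = rank.get(emotion, n)
--         if max_value is None or score > max_value:
--             max_value, best = score, r
--         elif score == max_value and r < best:
--             best = r
--
--     if max_value is None:
--         return "neutral"
--     if best < n: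
--         return priority_order[best]
-- ===== Notes on version B (the rewrite author's own statement) =====
-- stated objective: alternative
-- what changed: A makes three staged passes (max over the values, build the list of tied emotions, scan the fixed priority list for the first tied one); B is a single pass over the items maintaining a running (max score, best priority rank) pair and finishes by indexing the priority list once.
-- outside the precondition, e.g. on get_primary_emotion({'meh': 1}): A returns None, B returns None
import Mathlib
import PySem

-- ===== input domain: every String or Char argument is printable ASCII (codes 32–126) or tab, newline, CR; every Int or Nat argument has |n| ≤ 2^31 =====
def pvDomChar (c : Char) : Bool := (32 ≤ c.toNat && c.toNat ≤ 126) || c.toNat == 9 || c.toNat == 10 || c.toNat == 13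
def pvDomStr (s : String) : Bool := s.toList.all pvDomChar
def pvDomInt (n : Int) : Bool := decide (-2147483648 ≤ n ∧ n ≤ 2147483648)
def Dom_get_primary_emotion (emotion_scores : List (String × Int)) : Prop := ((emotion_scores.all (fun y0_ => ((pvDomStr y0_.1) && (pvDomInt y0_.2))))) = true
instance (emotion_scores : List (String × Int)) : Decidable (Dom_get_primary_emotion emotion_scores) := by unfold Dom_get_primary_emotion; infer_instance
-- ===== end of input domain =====

-- B replaces A's three staged passes (max of values, list of tied emotions, scan of
-- the priority list) with ONE pass over the items keeping a running (max, best-rank)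
-- pair, then indexes the priority list once (alternative decomposition, same result).
-- Pre_ excludes inputs on which A falls through and returns None (no top-scoring
-- emotion is in the priority list): there neither Python returns a String.


-- ===== PORT A =====
-- Plutchik's Wheel of Emotions priority order (both Pythons' priority_order list)
def pyPriority : List String :=
  ["fear", "sadness", "anger", "disgust", "joy", "trust", "anticipation", "surprise"]

def get_primary_emotion (emotion_scores : List (String × Int)) : String :=
  if emotion_scores = [] then "neutral"
  else
    let d := PySem.Dict.ofList emotion_scores
    match PySem.List.max? d.values (fun v => v) with
    | none => ""   -- unreachable: d.values ≠ [] when emotion_scores ≠ []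
    | some max_value =>
      let top_emotions := (d.items.filter (fun kv => kv.2 == max_value)).map Prod.fst
      match pyPriority.find? (fun e => top_emotions.contains e) with
      | some e => e
      | none => ""   -- Python's implicit 'return None'; excluded by Pre_

-- ===== PORT B =====
-- rank table: emotion ↦ its index in the priority order (B's rank dict)
def pyRank : PySem.Dict String Int :=
  PySem.Dict.ofList
    [("fear", 0), ("sadness", 1), ("anger", 2), ("disgust", 3),
     ("joy", 4), ("trust", 5), ("anticipation", 6), ("surprise", 7)]

-- loop body of B: state = (max_value : Option Int, best : Int)
def pvStepB (st : Option Int × Int) (kv : String × Int) : Option Int × Int :=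
  let r := pyRank.getD kv.1 8
  match st.1 with
  | none => (some kv.2, r)
  | some m =>
    if m < kv.2 then (some kv.2, r)
    else if kv.2 == m && r < st.2 then (some m, r)
    else st

def get_primary_emotion_alt (emotion_scores : List (String × Int)) : String :=
  let d := PySem.Dict.ofList emotion_scores
  let st := d.items.foldl pvStepB (none, 8)
  match st.1 with
  | none => "neutral"   -- max_value is None: the dict was empty
  | some _ =>
    if st.2 < 8 then (PySem.List.pyGet? pyPriority st.2).getD ""
    else ""   -- Python's implicit 'return None'; excluded by Pre_

-- ===== PRECONDITION & SPEC =====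
-- Pre_ excludes exactly the inputs where no maximal-scoring key is in the priority
-- list: there both Pythons return None, which is not a String.
def Pre_get_primary_emotion (emotion_scores : List (String × Int)) : Prop :=
  emotion_scores = [] ∨
    ∃ kv ∈ (PySem.Dict.ofList emotion_scores).items,
      kv.1 ∈ pyPriority ∧
      ∀ kv' ∈ (PySem.Dict.ofList emotion_scores).items, kv'.2 ≤ kv.2

instance (emotion_scores : List (String × Int)) : Decidable (Pre_get_primary_emotion emotion_scores) := by
  unfold Pre_get_primary_emotion; infer_instance

def pvWitness_get_primary_emotion : (List (String × Int)) := [("joy", 3), ("fear", 3), ("meh", 1)]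

def Spec_get_primary_emotion (emotion_scores : List (String × Int)) (out : String) : Prop := out = get_primary_emotion_alt emotion_scores
instance (emotion_scores : List (String × Int)) (out : String) : Decidable (Spec_get_primary_emotion emotion_scores out) := by unfold Spec_get_primary_emotion; infer_instance

-- ===== CLAIM (what is proved, stated in full; the proofs are below) =====
def Claim_equal_get_primary_emotion : Prop := ∀ (emotion_scores : List (String × Int)), Dom_get_primary_emotion emotion_scores → Pre_get_primary_emotion emotion_scores → Spec_get_primary_emotion emotion_scores (get_primary_emotion emotion_scores)

-- ===== LEMMAS AND PROOFS =====

-- running max of the scores, seeded with m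
def pvMx (m : Int) (l : List (String × Int)) : Int :=
  l.foldl (fun a kv => if a < kv.2 then kv.2 else a) m

-- keys of the entries tied at value v
def pvTied (l : List (String × Int)) (v : Int) : List String :=
  (l.filter (fun kv => kv.2 == v)).map Prod.fst

-- running min of ranks over a key list, seeded with b
def pvMn (b : Int) (ts : List String) : Int :=
  ts.foldl (fun a k => min a (pyRank.getD k 8)) b

theorem pvMx_init_le (l : List (String × Int)) : ∀ m : Int, m ≤ pvMx m l := by
  induction l with
  | nil => intro m; exact le_refl m
  | cons kv t ih =>
    intro m
    show m ≤ pvMx (if m < kv.2 then kv.2 else m) t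
    refine le_trans ?_ (ih _)
    split <;> omega

theorem pvMx_mem (l : List (String × Int)) :
    ∀ m : Int, pvMx m l = m ∨ ∃ kv ∈ l, pvMx m l = kv.2 := by
  induction l with
  | nil => intro m; exact Or.inl rfl
  | cons kv t ih =>
    intro m
    have h0 : pvMx m (kv :: t) = pvMx (if m < kv.2 then kv.2 else m) t := rfl
    rcases ih (if m < kv.2 then kv.2 else m) with h | ⟨kv', hkv', h⟩
    · by_cases hm : m < kv.2
      · refine Or.inr ⟨kv, by simp, ?_⟩
        rw [h0, h, if_pos hm]
      · refine Or.inl ?_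
        rw [h0, h, if_neg hm]
    · exact Or.inr ⟨kv', by simp [hkv'], by rw [h0, h]⟩

theorem pvMx_ge (l : List (String × Int)) :
    ∀ m : Int, ∀ kv ∈ l, kv.2 ≤ pvMx m l := by
  induction l with
  | nil => intro m kv h; cases h
  | cons kv0 t ih =>
    intro m kv h
    rcases List.mem_cons.mp h with rfl | h
    · show kv.2 ≤ pvMx (if m < kv.2 then kv.2 else m) t
      refine le_trans ?_ (pvMx_init_le _ _)
      split <;> omega
    · exact ih _ kv h

theorem pv_rank_le8 (k : String) : pyRank.getD k 8 ≤ 8 := by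
  by_cases hc : pyRank.contains k
  · have hk : k ∈ pyRank.keys := (PySem.Dict.contains_iff_mem_keys _ _).mp hc
    have hkeys : pyRank.keys = pyPriority := by decide
    rw [hkeys] at hk
    fin_cases hk <;> decide
  · rw [PySem.Dict.getD_of_not_contains _ _ (by simpa using hc)]

theorem pv_rank_lt8_mem (k : String) (h : pyRank.getD k 8 < 8) : k ∈ pyPriority := by
  by_cases hc : pyRank.contains k
  · have hk : k ∈ pyRank.keys := (PySem.Dict.contains_iff_mem_keys _ _).mp hc
    have hkeys : pyRank.keys = pyPriority := by decide
    rwa [hkeys] at hk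
  · rw [PySem.Dict.getD_of_not_contains _ _ (by simpa using hc)] at h
    omega

theorem pvMn_le (ts : List String) : ∀ b : Int, pvMn b ts ≤ b ∧ ∀ k ∈ ts, pvMn b ts ≤ pyRank.getD k 8 := by
  induction ts with
  | nil => intro b; exact ⟨le_refl b, fun k h => absurd h (List.not_mem_nil)⟩
  | cons k0 t ih =>
    intro b
    have h0 : pvMn b (k0 :: t) = pvMn (min b (pyRank.getD k0 8)) t := rfl
    obtain ⟨h1, h2⟩ := ih (min b (pyRank.getD k0 8))
    refine ⟨by rw [h0]; omega, ?_⟩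
    intro k hk
    rcases List.mem_cons.mp hk with rfl | hk
    · rw [h0]; omega
    · rw [h0]; exact h2 k hk

theorem pvMn_attained (ts : List String) :
    ∀ b : Int, pvMn b ts = b ∨ ∃ k ∈ ts, pvMn b ts = pyRank.getD k 8 := by
  induction ts with
  | nil => intro b; exact Or.inl rfl
  | cons k0 t ih =>
    intro b
    have h0 : pvMn b (k0 :: t) = pvMn (min b (pyRank.getD k0 8)) t := rfl
    rcases ih (min b (pyRank.getD k0 8)) with h | ⟨k, hk, hkv⟩
    · rw [h0, h]
      rcases le_or_gt b (pyRank.getD k0 8) with hle | hgt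
      · exact Or.inl (min_eq_left hle)
      · exact Or.inr ⟨k0, by simp, by omega⟩
    · exact Or.inr ⟨k, by simp [hk], by rw [h0, hkv]⟩

-- the single-pass fold, characterised: max so far, and min rank among the keys tied at it
theorem pv_fold_char (l : List (String × Int)) :
    ∀ (m b : Int), b ≤ 8 →
    l.foldl pvStepB (some m, b) =
      (some (pvMx m l), pvMn (if pvMx m l = m then b else 8) (pvTied l (pvMx m l))) := by
  induction l with
  | nil => intro m b _; simp [pvMx, pvTied, pvMn]
  | cons kv t ih =>
    intro m b hb
    have hM : pvMx m (kv :: t) = pvMx (if m < kv.2 then kv.2 else m) t := rfl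
    by_cases h1 : m < kv.2
    · -- reset: new max kv.2, new best = rank of kv.1
      have hstep : pvStepB (some m, b) kv = (some kv.2, pyRank.getD kv.1 8) := by
        show (if m < kv.2 then (some kv.2, pyRank.getD kv.1 8)
              else if kv.2 == m && pyRank.getD kv.1 8 < b then (some m, pyRank.getD kv.1 8)
              else (some m, b)) = _
        rw [if_pos h1]
      have hM' : pvMx m (kv :: t) = pvMx kv.2 t := by rw [hM, if_pos h1]
      rw [List.foldl_cons, hstep, ih kv.2 _ (pv_rank_le8 _), hM']
      have hMge : kv.2 ≤ pvMx kv.2 t := pvMx_init_le t kv.2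
      have hMne : pvMx kv.2 t ≠ m := by omega
      rw [if_neg hMne]
      by_cases h2 : kv.2 = pvMx kv.2 t
      · have htied : pvTied (kv :: t) (pvMx kv.2 t) = kv.1 :: pvTied t (pvMx kv.2 t) := by
          simp [pvTied, ← h2]
        rw [htied, if_pos h2.symm]
        have : pvMn 8 (kv.1 :: pvTied t (pvMx kv.2 t))
            = pvMn (min 8 (pyRank.getD kv.1 8)) (pvTied t (pvMx kv.2 t)) := rfl
        rw [this, min_eq_right (pv_rank_le8 _)]
      · have htied : pvTied (kv :: t) (pvMx kv.2 t) = pvTied t (pvMx kv.2 t) := by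
          simp [pvTied, h2]
        rw [htied, if_neg (fun h => h2 h.symm)]
    · by_cases h2 : kv.2 = m
      · -- tie: best := min best (rank kv.1)
        have hstep : pvStepB (some m, b) kv = (some m, min b (pyRank.getD kv.1 8)) := by
          show (if m < kv.2 then (some kv.2, pyRank.getD kv.1 8)
                else if kv.2 == m && pyRank.getD kv.1 8 < b then (some m, pyRank.getD kv.1 8)
                else (some m, b)) = _
          rw [if_neg h1]
          have h2' : (kv.2 == m) = true := by simp [h2]
          by_cases h3 : pyRank.getD kv.1 8 < b
          · rw [min_eq_right h3.le]; simp [h2', h3]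
          · rw [min_eq_left (by omega)]; simp [h2', h3]
        have hM' : pvMx m (kv :: t) = pvMx m t := by rw [hM, if_neg h1]
        rw [List.foldl_cons, hstep, ih m _ (by have := pv_rank_le8 kv.1; omega), hM']
        by_cases h3 : pvMx m t = m
        · have htied : pvTied (kv :: t) (pvMx m t) = kv.1 :: pvTied t (pvMx m t) := by
            simp [pvTied, h3, h2]
          rw [htied, if_pos h3, if_pos h3]
          rfl
        · have hgt : m < pvMx m t := lt_of_le_of_ne (pvMx_init_le t m) (fun h => h3 h.symm)
          have htied : pvTied (kv :: t) (pvMx m t) = pvTied t (pvMx m t) := by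
            simp only [pvTied, List.filter_cons]
            rw [if_neg (by simp; omega)]
          rw [htied, if_neg h3, if_neg h3]
      · -- kv.2 < m: state unchanged
        have hlt : kv.2 < m := by omega
        have hstep : pvStepB (some m, b) kv = (some m, b) := by
          show (if m < kv.2 then (some kv.2, pyRank.getD kv.1 8)
                else if kv.2 == m && pyRank.getD kv.1 8 < b then (some m, pyRank.getD kv.1 8)
                else (some m, b)) = _
          rw [if_neg h1]
          simp [h2]
        have hM' : pvMx m (kv :: t) = pvMx m t := by rw [hM, if_neg h1]
        rw [List.foldl_cons, hstep, ih m b hb, hM']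
        have hge : m ≤ pvMx m t := pvMx_init_le t m
        have htied : pvTied (kv :: t) (pvMx m t) = pvTied t (pvMx m t) := by
          simp only [pvTied, List.filter_cons]
          rw [if_neg (by simp; omega)]
        rw [htied]

-- A's priority scan finds exactly the minimal-rank member of the pool
theorem pv_find_min (P : List String) (hP : P.Pairwise (fun x y => pyRank.getD x 8 < pyRank.getD y 8)) :
    ∀ (ts : List String) (k : String), k ∈ P → k ∈ ts →
    (∀ x ∈ ts, pyRank.getD k 8 ≤ pyRank.getD x 8) →
    P.find? (fun e => ts.contains e) = some k := by
  induction P with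
  | nil => intro ts k h; cases h
  | cons p P ih =>
    intro ts k hkP hkts hmin
    rcases List.mem_cons.mp hkP with rfl | hkP'
    · rw [List.find?_cons_of_pos (by simpa using hkts)]
    · have hplt : pyRank.getD p 8 < pyRank.getD k 8 :=
        (List.pairwise_cons.mp hP).1 k hkP'
      have hpnot : ts.contains p = false := by
        by_contra h
        have : p ∈ ts := by simpa using (Bool.not_eq_false _).mp h
        exact absurd (hmin p this) (by omega)
      rw [List.find?_cons_of_neg (by simpa using hpnot)]
      exact ih (List.pairwise_cons.mp hP).2 ts k hkP' hkts hmin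

-- every priority-listed emotion has rank below 8
theorem pv_rank_lt8_of_mem (k : String) (hk : k ∈ pyPriority) : pyRank.getD k 8 < 8 := by
  fin_cases hk <;> decide

-- indexing the priority list by a member's rank gives back that member
theorem pv_get_rank (k : String) (hk : k ∈ pyPriority) :
    (PySem.List.pyGet? pyPriority (pyRank.getD k 8)).getD "" = k := by
  fin_cases hk <;> decide

-- dicts built from nonempty lists have nonempty items
theorem pv_items_insert_ne_nil {κ ν : Type} [BEq κ] (d : PySem.Dict κ ν) (k : κ) (v : ν) :
    (d.insert k v).items ≠ [] := by
  rw [PySem.Dict.items_insert]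
  by_cases h : d.contains k
  · have hni : d.items ≠ [] := by
      intro hnil
      rw [show d.contains k = d.items.any (fun p => p.1 == k) from rfl, hnil] at h
      simp at h
    simp [h, hni]
  · simp [h]

theorem pv_items_update_ne_nil (t : List (String × Int)) :
    ∀ (d : PySem.Dict String Int), d.items ≠ [] →
    (List.foldl (fun acc p => acc.insert p.1 p.2) d t).items ≠ [] := by
  induction t with
  | nil => exact fun d h => h
  | cons y t ih =>
    intro d h
    simp only [List.foldl_cons]
    exact ih _ (pv_items_insert_ne_nil _ _ _)

theorem pv_items_ofList_ne_nil (es : List (String × Int)) (h : es ≠ []) :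
    (PySem.Dict.ofList es).items ≠ [] := by
  obtain ⟨x, t, rfl⟩ := List.exists_cons_of_ne_nil h
  show (List.foldl (fun acc p => acc.insert p.1 p.2) PySem.Dict.empty (x :: t)).items ≠ []
  simp only [List.foldl_cons]
  exact pv_items_update_ne_nil t _ (pv_items_insert_ne_nil _ _ _)

-- ===== VERDICT (by name: the statement is the Claim_ definition above) =====
theorem get_primary_emotion_spec : Claim_equal_get_primary_emotion := by
  intro es _ hpre
  unfold Spec_get_primary_emotion
  by_cases hnil : es = []
  · subst hnil
    simp [get_primary_emotion, get_primary_emotion_alt]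
    rfl
  · rcases hpre with rfl | ⟨kv, hkv, hkvP, hkvmax⟩
    · exact absurd rfl hnil
    unfold get_primary_emotion get_primary_emotion_alt
    rw [if_neg hnil]
    have hitems := pv_items_ofList_ne_nil es hnil
    set d := PySem.Dict.ofList es with hd
    obtain ⟨h0, t, hht⟩ := List.exists_cons_of_ne_nil hitems
    -- B's fold, characterised
    have hfold : d.items.foldl pvStepB (none, 8)
        = (some (pvMx h0.2 t), pvMn (if pvMx h0.2 t = h0.2 then pyRank.getD h0.1 8 else 8) (pvTied t (pvMx h0.2 t))) := by
      rw [hht, List.foldl_cons]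
      exact pv_fold_char t h0.2 (pyRank.getD h0.1 8) (pv_rank_le8 _)
    set M := pvMx h0.2 t with hMdef
    -- the final best is the min rank over ALL items tied at M
    have hbest : pvMn (if M = h0.2 then pyRank.getD h0.1 8 else 8) (pvTied t M)
        = pvMn 8 (pvTied d.items M) := by
      rw [hht]
      by_cases h2 : h0.2 = M
      · have htied : pvTied (h0 :: t) M = h0.1 :: pvTied t M := by
          simp [pvTied, h2]
        rw [htied, if_pos h2.symm]
        have : pvMn 8 (h0.1 :: pvTied t M) = pvMn (min 8 (pyRank.getD h0.1 8)) (pvTied t M) := rfl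
        rw [this, min_eq_right (pv_rank_le8 _)]
      · have htied : pvTied (h0 :: t) M = pvTied t M := by
          simp [pvTied, h2]
        rw [htied, if_neg (fun h => h2 h.symm)]
    -- M is the max of the dict's values
    have hMmem : ∃ kv' ∈ d.items, M = kv'.2 := by
      rcases pvMx_mem t h0.2 with h | ⟨kv', hkv', h⟩
      · exact ⟨h0, by rw [hht]; simp, h⟩
      · exact ⟨kv', by rw [hht]; simp [hkv'], h⟩
    have hMge : ∀ kv' ∈ d.items, kv'.2 ≤ M := by
      intro kv' hkv'
      rw [hht] at hkv'
      rcases List.mem_cons.mp hkv' with heq | h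
      · rw [heq, hMdef]; exact pvMx_init_le t h0.2
      · exact pvMx_ge t h0.2 kv' h
    have hvals : d.values = d.items.map Prod.snd := rfl
    cases hmax : PySem.List.max? d.values (fun v => v) with
    | none =>
      have := (PySem.List.max?_eq_none_iff _ _).mp hmax
      rw [hvals] at this
      exact absurd (List.map_eq_nil_iff.mp this) (by rw [hht]; simp)
    | some maxv =>
      have hMeq : maxv = M := by
        obtain ⟨kvM, hkvM, hMv⟩ := hMmem
        have h1 : M ≤ maxv := hMv ▸ PySem.List.max?_isMax hmax _
          (by rw [hvals]; exact List.mem_map_of_mem hkvM)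
        have h2 : maxv ≤ M := by
          have hm : maxv ∈ d.values := PySem.List.max?_mem hmax
          rw [hvals] at hm
          obtain ⟨kv', hkv', hv⟩ := List.mem_map.mp hm
          exact hv ▸ hMge kv' hkv'
        omega
      subst hMeq
      -- kv attains the max, so its key is in the tied pool
      have hkv2 : kv.2 = M := le_antisymm (hMge kv hkv) (by
        obtain ⟨kv'', hkv'', hv⟩ := hMmem
        exact hv ▸ hkvmax kv'' hkv'')
      set ts := pvTied d.items M with hts
      have hkv1ts : kv.1 ∈ ts := by
        rw [hts]
        exact List.mem_map_of_mem (List.mem_filter.mpr ⟨hkv, by simp [hkv2]⟩)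
      -- the final best b: bounds, attainment
      set b := pvMn 8 ts with hb
      obtain ⟨_, hble⟩ := pvMn_le ts 8
      have hblt : b < 8 := by
        have h1 : b ≤ pyRank.getD kv.1 8 := hble kv.1 hkv1ts
        have h2 : pyRank.getD kv.1 8 < 8 := pv_rank_lt8_of_mem kv.1 hkvP
        omega
      obtain ⟨k, hkts, hkb⟩ : ∃ k ∈ ts, b = pyRank.getD k 8 := by
        rcases pvMn_attained ts 8 with h | h
        · omega
        · exact h
      have hkP : k ∈ pyPriority := pv_rank_lt8_mem k (by omega)
      -- A's find? returns k
      have hfind : pyPriority.find? (fun e => ts.contains e) = some k := by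
        refine pv_find_min pyPriority (by decide) ts k hkP hkts ?_
        intro x hx
        rw [← hkb]
        exact hble x hx
      -- both sides compute k
      have hts' : (List.map Prod.fst (List.filter (fun kv => kv.2 == M) d.items)) = ts := rfl
      simp only [hmax, hfold, hbest, hts', hfind]
      rw [if_pos hblt, hkb, pv_get_rank k hkP]
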